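-- pv_equiv track=rewrite | github.com/sagemath/sage-archive-2023-02-01 | src/sage/arith/misc.py | continuant
-- ===== SOURCE A (Python) =====
-- def continuant(v, n=None):
--     r"""
--     Function returns the continuant of the sequence `v` (list
--     or tuple).
--
--     Definition: see Graham, Knuth and Patashnik, *Concrete Mathematics*,
--     section 6.7: Continuants. The continuant is defined by
--
--     - `K_0() = 1`
--     - `K_1(x_1) = x_1`
--     - `K_n(x_1, \cdots, x_n) = K_{n-1}(x_n, \cdots x_{n-1})x_n + K_{n-2}(x_1,  \cdots, x_{n-2})`
--
--     If ``n = None`` or ``n > len(v)`` the default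
--     ``n = len(v)`` is used.
--
--     INPUT:
--
--     -  ``v`` - list or tuple of elements of a ring
--     -  ``n`` - optional integer
--
--     OUTPUT: element of ring (integer, polynomial, etcetera).
--
--     EXAMPLES::
--
--         sage: continuant([1,2,3])
--         10
--         sage: p = continuant([2, 1, 2, 1, 1, 4, 1, 1, 6, 1, 1, 8, 1, 1, 10])
--         sage: q = continuant([1, 2, 1, 1, 4, 1, 1, 6, 1, 1, 8, 1, 1, 10])
--         sage: p/q
--         517656/190435
--         sage: continued_fraction([2, 1, 2, 1, 1, 4, 1, 1, 6, 1, 1, 8, 1, 1, 10]).convergent(14)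
--         517656/190435
--         sage: x = PolynomialRing(RationalField(),'x',5).gens()
--         sage: continuant(x)
--         x0*x1*x2*x3*x4 + x0*x1*x2 + x0*x1*x4 + x0*x3*x4 + x2*x3*x4 + x0 + x2 + x4
--         sage: continuant(x, 3)
--         x0*x1*x2 + x0 + x2
--         sage: continuant(x,2)
--         x0*x1 + 1
--
--     We verify the identity
--
--     .. math::
--
--         K_n(z,z,\cdots,z) = \sum_{k=0}^n \binom{n-k}{k} z^{n-2k}
--
--     for `n = 6` using polynomial arithmetic::
--
--         sage: z = QQ['z'].0
--         sage: continuant((z,z,z,z,z,z,z,z,z,z,z,z,z,z,z),6)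
--         z^6 + 5*z^4 + 6*z^2 + 1
--
--         sage: continuant(9)
--         Traceback (most recent call last):
--         ...
--         TypeError: object of type 'sage.rings.integer.Integer' has no len()
--
--     AUTHORS:
--
--     - Jaap Spies (2007-02-06)
--     """
--     m = len(v)
--     if n is None or m < n:
--         n = m
--     if n == 0:
--         return 1
--     if n == 1:
--         return v[0]
--     a, b = 1, v[0]
--     for k in range(1,n):
--         a, b = b, a + b*v[k]
--     return b
-- ===== SOURCE B (Python) =====
-- def continuant(v, n=None):
--     m = len(v)
--     if n is None or m < n:
--         n = m
--     # Divide and conquer: the continuant K_n is the top-left entry of the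
--     # product of the matrices [[v[k],1],[1,0]] for k in [0, n); compute that
--     # product by recursively splitting the index range in half.
--     return _contprod(v, 0, n)[0]
--
-- def _contprod(v, lo, hi):
--     if hi - lo <= 0:
--         return (1, 0, 0, 1)
--     if hi - lo == 1:
--         x = v[lo]
--         return (x, 1, 1, 0)
--     mid = (lo + hi) // 2
--     a0, a1, a2, a3 = _contprod(v, lo, mid)
--     b0, b1, b2, b3 = _contprod(v, mid, hi)
--     return (a0 * b0 + a1 * b2, a0 * b1 + a1 * b3,
--             a2 * b0 + a3 * b2, a2 * b1 + a3 * b3)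
-- ===== Notes on version B (the rewrite author's own statement) =====
-- stated objective: alternative
-- what changed: B computes the continuant as the top-left entry of the product of the 2x2 matrices [[v[k],1],[1,0]], evaluated by a divide-and-conquer product tree that recursively splits the index range in half, instead of A's single forward scan with two scalar accumulators and special cases for n=0 and n=1.
-- intended difference: For a negative explicit n with nonempty v, A falls through its branches and returns leftover loop state (the first element of v), while B returns the empty continuant K_0 = 1, the intended value for taking no terms; D_ is restricted to first element != 1, where the two provably always differ. — e.g. on continuant([2, 3], some (-1)): A returns 2, B returns 1
-- crash fix: On empty v with a negative explicit n, A raises IndexError (indexing an empty list); B returns the empty continuant, 1. — e.g. on continuant([], some (-1)): A raises IndexError, B returns 1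
import Mathlib
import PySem

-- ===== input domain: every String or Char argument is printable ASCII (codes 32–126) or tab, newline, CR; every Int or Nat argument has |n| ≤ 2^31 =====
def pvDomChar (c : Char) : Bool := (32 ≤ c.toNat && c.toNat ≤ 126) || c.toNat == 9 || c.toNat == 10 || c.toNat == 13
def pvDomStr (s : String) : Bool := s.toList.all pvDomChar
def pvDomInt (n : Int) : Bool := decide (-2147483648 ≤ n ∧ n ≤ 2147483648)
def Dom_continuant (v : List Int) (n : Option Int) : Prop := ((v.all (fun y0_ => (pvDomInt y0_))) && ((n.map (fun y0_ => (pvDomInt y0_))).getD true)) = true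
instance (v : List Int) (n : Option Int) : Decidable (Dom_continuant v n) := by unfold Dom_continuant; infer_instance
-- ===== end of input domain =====

-- B replaces A's forward scan with two scalar accumulators by a divide-and-conquer
-- 2x2 matrix product tree (alternative algorithm, same cost); return-value
-- equivalence outside D_continuant.

-- ===== PORT A =====
def continuant (v : List Int) (n : Option Int) : Int :=
  let m : Int := v.length
  let n' : Int := match n with
    | none => m
    | some k => if m < k then m else k
  if n' = 0 then 1
  else if n' = 1 then (PySem.List.pyGet? v 0).getD 0
  else
    let st := (PySem.List.pyRange 1 n' 1).foldl
      (fun (ab : Int × Int) k => (ab.2, ab.1 + ab.2 * (PySem.List.pyGet? v k).getD 0))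
      (1, (PySem.List.pyGet? v 0).getD 0)
    st.2

-- ===== PORT B =====
-- _contprod from Source B: recursive product of the matrices [[v[k],1],[1,0]], k in [lo,hi)
def contprod (v : List Int) (lo hi : Int) : Int × Int × Int × Int :=
  if hi - lo ≤ 0 then (1, 0, 0, 1)
  else if hi - lo = 1 then
    let x := (PySem.List.pyGet? v lo).getD 0
    (x, 1, 1, 0)
  else
    let mid := PySem.Int.floordiv (lo + hi) 2
    let a := contprod v lo mid
    let b := contprod v mid hi
    (a.1 * b.1 + a.2.1 * b.2.2.1, a.1 * b.2.1 + a.2.1 * b.2.2.2,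
     a.2.2.1 * b.1 + a.2.2.2 * b.2.2.1, a.2.2.1 * b.2.1 + a.2.2.2 * b.2.2.2)
termination_by (hi - lo).toNat
decreasing_by
  · have := (PySem.Int.floordiv_lt_iff_lt_mul (a := lo + hi) (b := 2) (q := hi) (by omega)).mpr (by omega)
    omega
  · have := (PySem.Int.le_floordiv_iff_mul_le (a := lo + hi) (b := 2) (q := lo + 1) (by omega)).mpr (by omega)
    omega

def continuant_alt (v : List Int) (n : Option Int) : Int :=
  let m : Int := v.length
  let n' : Int := match n with
    | none => m
    | some k => if m < k then m else k
  (contprod v 0 n').1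

-- ===== PRECONDITION & SPEC =====
-- Pre_ excludes only v = [] with an explicit negative n: there A raises IndexError on v[0].
def Pre_continuant (v : List Int) (n : Option Int) : Prop := v = [] → 0 ≤ n.getD 0
instance (v : List Int) (n : Option Int) : Decidable (Pre_continuant v n) := by unfold Pre_continuant; infer_instance
def pvWitness_continuant : List Int × Option Int := ([1, 2, 3], some 2)

-- On empty v with a negative explicit n, A raises IndexError (v[0] on an empty list); B returns 1, the empty continuant.
def Raises_continuant (v : List Int) (n : Option Int) : Prop := v = [] ∧ n.getD 0 < 0
instance (v : List Int) (n : Option Int) : Decidable (Raises_continuant v n) := by unfold Raises_continuant; infer_instance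
def pvRaiseWitness_continuant : List Int × Option Int := ([], some (-1))
def pvRaiseWitnessOut_continuant : Int := 1

-- For a negative explicit n with nonempty v, A falls through its branches and returns leftover
-- loop state v[0]; B returns 1 = K_0, the intended continuant of zero terms. D_ is restricted
-- to v[0] ≠ 1 (where they agree anyway when v[0] = 1), so A ≠ B everywhere inside D_.
def D_continuant (v : List Int) (n : Option Int) : Prop :=
  n.getD 0 < 0 ∧ v ≠ [] ∧ v.headI ≠ 1
instance (v : List Int) (n : Option Int) : Decidable (D_continuant v n) := by unfold D_continuant; infer_instance
def Spec_continuant (v : List Int) (n : Option Int) (out : Int) : Prop := ¬ D_continuant v n → out = continuant_alt v n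
instance (v : List Int) (n : Option Int) (out : Int) : Decidable (Spec_continuant v n out) := by unfold Spec_continuant; infer_instance
def pvDiffWitness_continuant : List Int × Option Int := ([2, 3], some (-1))
def pvDiffWitnessOut_continuant : Int × Int := (2, 1)

-- ===== CLAIM =====
def Claim_unchanged_continuant : Prop := ∀ (v : List Int) (n : Option Int), Dom_continuant v n → Pre_continuant v n → Spec_continuant v n (continuant v n)
def Claim_changed_continuant : Prop := Dom_continuant (pvDiffWitness_continuant.1) (pvDiffWitness_continuant.2) ∧ Pre_continuant (pvDiffWitness_continuant.1) (pvDiffWitness_continuant.2) ∧ D_continuant (pvDiffWitness_continuant.1) (pvDiffWitness_continuant.2) ∧ continuant (pvDiffWitness_continuant.1) (pvDiffWitness_continuant.2) = pvDiffWitnessOut_continuant.1 ∧ continuant_alt (pvDiffWitness_continuant.1) (pvDiffWitness_continuant.2) = pvDiffWitnessOut_continuant.2 ∧ pvDiffWitnessOut_continuant.1 ≠ pvDiffWitnessOut_continuant.2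
def Claim_exact_continuant : Prop := ∀ (v : List Int) (n : Option Int), Dom_continuant v n → Pre_continuant v n → D_continuant v n → continuant v n ≠ continuant_alt v n
def Claim_raises_continuant : Prop := (∀ (v : List Int) (n : Option Int), Dom_continuant v n → Raises_continuant v n → ¬ Pre_continuant v n) ∧ (Dom_continuant (pvRaiseWitness_continuant.1) (pvRaiseWitness_continuant.2) ∧ Raises_continuant (pvRaiseWitness_continuant.1) (pvRaiseWitness_continuant.2) ∧ continuant_alt (pvRaiseWitness_continuant.1) (pvRaiseWitness_continuant.2) = pvRaiseWitnessOut_continuant)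

-- ===== LEMMAS AND PROOFS =====

-- proof-only helpers: the clamped n, A's loop body, and the matrix fold characterising contprod
def pvClamp (v : List Int) (n : Option Int) : Int :=
  match n with
  | none => (v.length : Int)
  | some k => if (v.length : Int) < k then (v.length : Int) else k

def pvABody (v : List Int) (n' : Int) : Int :=
  if n' = 0 then 1
  else if n' = 1 then (PySem.List.pyGet? v 0).getD 0
  else
    ((PySem.List.pyRange 1 n' 1).foldl
      (fun (ab : Int × Int) k => (ab.2, ab.1 + ab.2 * (PySem.List.pyGet? v k).getD 0))
      (1, (PySem.List.pyGet? v 0).getD 0)).2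

def pvLeaf (v : List Int) (k : Int) : Int × Int × Int × Int :=
  ((PySem.List.pyGet? v k).getD 0, 1, 1, 0)

def pvMul (a b : Int × Int × Int × Int) : Int × Int × Int × Int :=
  (a.1 * b.1 + a.2.1 * b.2.2.1, a.1 * b.2.1 + a.2.1 * b.2.2.2,
   a.2.2.1 * b.1 + a.2.2.2 * b.2.2.1, a.2.2.1 * b.2.1 + a.2.2.2 * b.2.2.2)

def pvFold (v : List Int) (l : List Int) (init : Int × Int × Int × Int) : Int × Int × Int × Int :=
  l.foldl (fun acc k => pvMul acc (pvLeaf v k)) init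

theorem pvMul_assoc (a b c : Int × Int × Int × Int) : pvMul (pvMul a b) c = pvMul a (pvMul b c) := by
  simp [pvMul]; refine ⟨by ring, by ring, by ring, by ring⟩

theorem pvMul_one (a : Int × Int × Int × Int) : pvMul (1, 0, 0, 1) a = a := by
  simp [pvMul]

theorem pvFold_init (v : List Int) (l : List Int) (init : Int × Int × Int × Int) :
    pvFold v l init = pvMul init (pvFold v l (1, 0, 0, 1)) := by
  induction l generalizing init with
  | nil => simp [pvFold, pvMul]
  | cons h t ih =>
    simp only [pvFold, List.foldl] at *
    rw [ih, ih (pvMul (1,0,0,1) _), pvMul_one, pvMul_assoc]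

theorem contprod_eq_fold (v : List Int) (lo hi : Int) :
    contprod v lo hi = pvFold v (PySem.List.pyRange lo hi 1) (1, 0, 0, 1) := by
  by_cases hle : hi - lo ≤ 0
  · rw [contprod, PySem.List.pyRange_one_eq_nil (by omega), if_pos hle]
    rfl
  · by_cases h1 : hi - lo = 1
    · rw [contprod]
      have : PySem.List.pyRange lo hi 1 = [lo] := by
        have : hi = lo + 1 := by omega
        rw [this]; exact PySem.List.pyRange_one_singleton lo
      rw [if_neg hle, if_pos h1]
      simp [this, pvFold, pvMul, pvLeaf]
    · rw [contprod]
      simp only [if_neg hle, if_neg h1]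
      have hmidlo : lo ≤ PySem.Int.floordiv (lo + hi) 2 :=
        (PySem.Int.floordiv_two_mid_bounds (by omega)).1
      have hmidhi : PySem.Int.floordiv (lo + hi) 2 ≤ hi :=
        (PySem.Int.floordiv_two_mid_bounds (by omega)).2
      rw [contprod_eq_fold v lo, contprod_eq_fold v _ hi,
        PySem.List.pyRange_one_append lo _ hi hmidlo hmidhi]
      simp only [pvFold, List.foldl_append]
      rw [← pvFold, ← pvFold, ← pvFold,
        pvFold_init v (PySem.List.pyRange (PySem.Int.floordiv (lo + hi) 2) hi 1)
          (pvFold v (PySem.List.pyRange lo (PySem.Int.floordiv (lo + hi) 2) 1) (1, 0, 0, 1))]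
      rfl
termination_by (hi - lo).toNat
decreasing_by
  · have := (PySem.Int.floordiv_lt_iff_lt_mul (a := lo + hi) (b := 2) (q := hi) (by omega)).mpr (by omega)
    omega
  · have := (PySem.Int.le_floordiv_iff_mul_le (a := lo + hi) (b := 2) (q := lo + 1) (by omega)).mpr (by omega)
    omega

theorem continuant_eq_body (v : List Int) (n : Option Int) :
    continuant v n = pvABody v (pvClamp v n) := by
  cases n <;> rfl

theorem continuant_alt_eq_fold (v : List Int) (n : Option Int) :
    continuant_alt v n = (pvFold v (PySem.List.pyRange 0 (pvClamp v n) 1) (1, 0, 0, 1)).1 := by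
  cases n <;> simp only [continuant_alt, pvClamp, contprod_eq_fold]

theorem headI_get (v : List Int) (hv : v ≠ []) :
    (PySem.List.pyGet? v 0).getD 0 = v.headI := by
  cases v with
  | nil => exact absurd rfl hv
  | cons h t => simp [PySem.List.pyGet?, PySem.List.pyIdx?]

-- Invariant: the top-left of the running matrix fold tracks the second component of A's pair.
theorem matrix_tracks_pair (v : List Int) (l : List Int) :
    ∀ (a b r s : Int),
      (pvFold v l (b, a, r, s)).1
      = (l.foldl (fun (ab : Int × Int) k => (ab.2, ab.1 + ab.2 * (PySem.List.pyGet? v k).getD 0)) (a, b)).2 := by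
  induction l with
  | nil => intro a b r s; rfl
  | cons h t ih =>
    intro a b r s
    have := ih b (a + b * (PySem.List.pyGet? v h).getD 0) (r * (PySem.List.pyGet? v h).getD 0 + s) r
    simpa [pvFold, pvMul, pvLeaf, List.foldl, mul_comm, add_comm] using this

theorem body_eq_of_pos (v : List Int) (n' : Int) (hpos : 0 < n') :
    pvABody v n' = (pvFold v (PySem.List.pyRange 0 n' 1) (1, 0, 0, 1)).1 := by
  unfold pvABody
  rw [show PySem.List.pyRange 0 n' 1 = 0 :: PySem.List.pyRange 1 n' 1 from
    by simpa using PySem.List.pyRange_one_cons hpos]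
  by_cases h1 : n' = 1
  · subst h1
    simp [PySem.List.pyRange_one_eq_nil (le_refl (1:Int)), pvFold, pvMul, pvLeaf]
  · simp only [show n' ≠ 0 by omega, if_false, h1, if_false]
    rw [show pvFold v (0 :: PySem.List.pyRange 1 n' 1) (1,0,0,1)
        = pvFold v (PySem.List.pyRange 1 n' 1) ((PySem.List.pyGet? v 0).getD 0, 1, 1, 0) from by
      simp [pvFold, pvMul, pvLeaf, List.foldl]]
    rw [matrix_tracks_pair]

theorem continuant_spec : Claim_unchanged_continuant := by
  intro v n _ hpre hnd
  show continuant v n = continuant_alt v n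
  rw [continuant_eq_body, continuant_alt_eq_fold]
  by_cases hpos : 0 < pvClamp v n
  · have hv : v ≠ [] := by
      intro hnil
      subst hnil
      rcases n with _ | k
      · simp [pvClamp] at hpos
      · have hk : 0 ≤ k := hpre rfl
        simp [pvClamp] at hpos
        omega
    exact body_eq_of_pos v _ hpos
  · by_cases h0 : pvClamp v n = 0
    · rw [h0]
      simp [pvABody, pvFold, PySem.List.pyRange_one_eq_nil (le_refl (0:Int))]
    · have hneg : pvClamp v n < 0 := by omega
      have hk : ∃ k, n = some k ∧ k < 0 := by
        rcases n with _ | k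
        · exfalso; simp [pvClamp] at hneg; omega
        · refine ⟨k, rfl, ?_⟩
          simp only [pvClamp] at hneg
          split at hneg <;> omega
      rcases hk with ⟨k, rfl, hk⟩
      have hv : v ≠ [] := by
        intro hnil; have := hpre hnil; simp at this; omega
      have hhead : v.headI = 1 := by
        by_contra hh
        exact hnd ⟨by simpa using hk, hv, hh⟩
      unfold pvABody
      rw [PySem.List.pyRange_one_eq_nil (show pvClamp v (some k) ≤ 0 by omega)]
      simp [pvFold, PySem.List.pyRange_one_eq_nil (show pvClamp v (some k) ≤ 1 by omega),
        headI_get v hv, hhead, show pvClamp v (some k) ≠ 0 by omega,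
        show pvClamp v (some k) ≠ 1 by omega]

theorem continuant_alt_diffwitness : continuant_alt [2, 3] (some (-1)) = 1 := by
  rw [continuant_alt_eq_fold,
    show pvClamp [2, 3] (some (-1)) = -1 from rfl,
    PySem.List.pyRange_one_eq_nil (by norm_num)]
  rfl

theorem continuant_alt_raisewitness : continuant_alt [] (some (-1)) = 1 := by
  rw [continuant_alt_eq_fold,
    show pvClamp [] (some (-1)) = -1 from rfl,
    PySem.List.pyRange_one_eq_nil (by norm_num)]
  rfl

theorem continuant_changed : Claim_changed_continuant := by
  unfold Claim_changed_continuant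
  exact ⟨by decide, by decide, by decide, by decide, continuant_alt_diffwitness, by decide⟩

theorem continuant_tight : Claim_exact_continuant := by
  intro v n _ _ hd
  rcases hd with ⟨hneg, hv, hh⟩
  rcases n with _ | k
  · simp at hneg
  · simp only [Option.getD] at hneg
    rw [continuant_eq_body, continuant_alt_eq_fold]
    have hcl : pvClamp v (some k) = k := by
      have : (0:Int) ≤ v.length := Int.natCast_nonneg _
      simp only [pvClamp]
      split <;> omega
    rw [hcl]
    unfold pvABody
    rw [PySem.List.pyRange_one_eq_nil (show k ≤ 0 by omega)]
    simp [pvFold, PySem.List.pyRange_one_eq_nil (show k ≤ 1 by omega),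
      headI_get v hv, show k ≠ 0 by omega, show k ≠ 1 by omega]
    exact hh

theorem continuant_raises : Claim_raises_continuant := by
  unfold Claim_raises_continuant
  refine ⟨?_, by decide, by decide, continuant_alt_raisewitness⟩
  intro v n _ h hpre
  rcases h with ⟨hnil, hneg⟩
  have := hpre hnil; omega

-- self-check: the raise witness really lies outside Pre_ (via continuant_raises)
theorem continuant_raises_witness_ok :
    ¬ Pre_continuant pvRaiseWitness_continuant.1 pvRaiseWitness_continuant.2 :=
  continuant_raises.1 pvRaiseWitness_continuant.1 pvRaiseWitness_continuant.2
    (by decide) (by decide)
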